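-- pv_equiv track=rewrite | github.com/lackoftrack27/Pac-Man-Master-Museum | RESOURCES/MAZES/colgen.py | classify_tile
-- ===== SOURCE A (Python) =====
-- BLACK   = (0, 0, 0)
--
-- YELLOW	= (255, 255, 0)
--
-- RED     = (255, 0, 0)
--
-- BLUE    = (0, 0, 255)
--
-- FFAAFF  = (255, 170, 255)
--
-- FFAAAA  = (255, 170, 170)
--
-- def classify_tile(tile_pixels):
--     unique_colors = set(tile_pixels)
--
--     if YELLOW in unique_colors:
--         return 3  # Super Edible
--     if FFAAAA in unique_colors:
--         return 2  # Edible
--     if RED in unique_colors or BLUE in unique_colors or FFAAFF in unique_colors: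
--         return 1  # Wall
--     if all(color == BLACK for color in unique_colors):
--         return 0  # Empty
--     return 0  # Default: treat as empty
-- ===== SOURCE B (Python) =====
-- _RANK = {(255, 255, 0): 3, (255, 170, 170): 2,
--          (255, 0, 0): 1, (0, 0, 255): 1, (255, 170, 255): 1}
--
-- def classify_tile(tile_pixels):
--     best = 0
--     for px in tile_pixels:
--         best = max(best, _RANK.get(px, 0))
--     return best
-- ===== Notes on version B (the rewrite author's own statement) =====
-- stated objective: simpler
-- what changed: Replaced the build-a-set-then-test-membership if-chain by a single pass that keeps the maximum priority rank (YELLOW=3, FFAAAA=2, wall colors=1) seen so far, exploiting that the chain returns in descending priority order.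
import Mathlib
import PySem

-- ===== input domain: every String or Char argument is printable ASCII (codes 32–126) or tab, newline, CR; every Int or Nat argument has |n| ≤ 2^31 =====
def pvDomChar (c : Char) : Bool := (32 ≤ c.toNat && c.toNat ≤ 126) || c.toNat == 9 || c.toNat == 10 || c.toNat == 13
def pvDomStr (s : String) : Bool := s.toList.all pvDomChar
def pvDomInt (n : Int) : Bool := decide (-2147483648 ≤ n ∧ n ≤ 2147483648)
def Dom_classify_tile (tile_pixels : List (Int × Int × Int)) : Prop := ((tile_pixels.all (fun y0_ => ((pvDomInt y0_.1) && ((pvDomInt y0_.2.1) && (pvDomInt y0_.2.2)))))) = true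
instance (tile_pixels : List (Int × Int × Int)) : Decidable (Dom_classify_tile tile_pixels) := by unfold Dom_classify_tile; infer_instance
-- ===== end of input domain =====

-- B replaces A's set-membership if-chain by one pass keeping the maximum priority rank seen (simpler decomposition, same cost).


-- ===== PORT A =====
def classify_tile (tile_pixels : List (Int × Int × Int)) : Int :=
  let unique_colors : PySem.Set (Int × Int × Int) := PySem.Set.ofList tile_pixels
  if PySem.Set.contains unique_colors (255, 255, 0) then 3
  else if PySem.Set.contains unique_colors (255, 170, 170) then 2
  else if PySem.Set.contains unique_colors (255, 0, 0) ||
          PySem.Set.contains unique_colors (0, 0, 255) ||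
          PySem.Set.contains unique_colors (255, 170, 255) then 1
  else if unique_colors.all (fun color => color == (0, 0, 0)) then 0
  else 0

-- ===== PORT B =====
def pvRankTable : PySem.Dict (Int × Int × Int) Int :=
  PySem.Dict.mk [((255, 255, 0), 3), ((255, 170, 170), 2), ((255, 0, 0), 1), ((0, 0, 255), 1), ((255, 170, 255), 1)]

def classify_tile_alt (tile_pixels : List (Int × Int × Int)) : Int :=
  tile_pixels.foldl (fun best px => max best (PySem.Dict.getD pvRankTable px 0)) 0

-- ===== PRECONDITION & SPEC =====
def Spec_classify_tile (tile_pixels : List (Int × Int × Int)) (out : Int) : Prop := out = classify_tile_alt tile_pixels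
instance (tile_pixels : List (Int × Int × Int)) (out : Int) : Decidable (Spec_classify_tile tile_pixels out) := by unfold Spec_classify_tile; infer_instance

-- ===== CLAIM (what is proved, stated in full; the proofs are below) =====
def Claim_equal_classify_tile : Prop := ∀ (tile_pixels : List (Int × Int × Int)), Dom_classify_tile tile_pixels → Spec_classify_tile tile_pixels (classify_tile tile_pixels)

-- ===== LEMMAS AND PROOFS =====

-- the if-chain value, as a helper spec
def pvChain (l : List (Int × Int × Int)) : Int :=
  if (255, 255, 0) ∈ l then 3
  else if (255, 170, 170) ∈ l then 2
  else if (255, 0, 0) ∈ l ∨ (0, 0, 255) ∈ l ∨ (255, 170, 255) ∈ l then 1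
  else 0

theorem pvChain_nonneg (l : List (Int × Int × Int)) : 0 ≤ pvChain l := by
  unfold pvChain; split_ifs <;> omega

theorem pvChain_cons (px : Int × Int × Int) (l : List (Int × Int × Int)) :
    pvChain (px :: l) = max (PySem.Dict.getD pvRankTable px 0) (pvChain l) := by
  unfold pvChain
  by_cases h1 : px = (255, 255, 0)
  · subst h1
    have hr : PySem.Dict.getD pvRankTable (255, 255, 0) 0 = 3 := by decide
    rw [hr]; simp [List.mem_cons]; split_ifs <;> omega
  · by_cases h2 : px = (255, 170, 170)
    · subst h2
      have hr : PySem.Dict.getD pvRankTable (255, 170, 170) 0 = 2 := by decide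
      rw [hr]; simp [List.mem_cons]
      split_ifs <;> omega
    · by_cases h3 : px = (255, 0, 0) ∨ px = (0, 0, 255) ∨ px = (255, 170, 255)
      · have hrank : PySem.Dict.getD pvRankTable px 0 = 1 := by
          rcases h3 with h | h | h <;> subst h <;> decide
        rw [hrank]
        rcases h3 with h | h | h <;> subst h <;>
          simp [List.mem_cons, Ne.symm h1, Ne.symm h2] <;> split_ifs <;> omega
      · have hrank : PySem.Dict.getD pvRankTable px 0 = 0 := by
          obtain ⟨h4, h5, h6⟩ : ¬px = (255, 0, 0) ∧ ¬px = (0, 0, 255) ∧ ¬px = (255, 170, 255) := by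
            tauto
          simp [pvRankTable, PySem.Dict.getD, Ne.symm h1, Ne.symm h2, Ne.symm h4, Ne.symm h5, Ne.symm h6, PySem.Dict.get?]
        rw [hrank]
        obtain ⟨h4, h5, h6⟩ : ¬px = (255, 0, 0) ∧ ¬px = (0, 0, 255) ∧ ¬px = (255, 170, 255) := by
          tauto
        simp [List.mem_cons, Ne.symm h1, Ne.symm h2, Ne.symm h4, Ne.symm h5, Ne.symm h6]
        split_ifs <;> omega

theorem foldl_max_rank (l : List (Int × Int × Int)) (b : Int) (hb : 0 ≤ b) :
    l.foldl (fun best px => max best (PySem.Dict.getD pvRankTable px 0)) b = max b (pvChain l) := by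
  induction l generalizing b with
  | nil => simp [pvChain]; omega
  | cons px rest ih =>
      simp only [List.foldl_cons]
      rw [ih _ (le_trans hb (le_max_left _ _)), pvChain_cons]
      omega

theorem alt_eq_chain (l : List (Int × Int × Int)) : classify_tile_alt l = pvChain l := by
  unfold classify_tile_alt
  rw [foldl_max_rank l 0 le_rfl]
  have := pvChain_nonneg l
  omega

theorem a_eq_chain (l : List (Int × Int × Int)) : classify_tile l = pvChain l := by
  unfold classify_tile pvChain
  simp only [PySem.Set.contains, List.contains_iff_mem, PySem.Set.mem_ofList]
  split_ifs <;> simp_all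

-- ===== VERDICT (by name: the statement is the Claim_ definition above) =====
theorem classify_tile_spec : Claim_equal_classify_tile := by
  intro l _
  unfold Spec_classify_tile
  rw [a_eq_chain, alt_eq_chain]
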